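-- pv_equiv track=rewrite | github.com/Ic4r0/advent_of_code2015 | days/day_17.py | part_2
-- ===== SOURCE A (Python) =====
-- from itertools import combinations
--
-- def part_2(input_list: list, is_test: bool) -> int:
--     """ Code for the 2nd part of the 17th day of Advent of Code
--
--     :param input_list: input list
--     :param is_test: flag to use test input
--     :return: numeric result
--     """
--     eggnog_liters = 25 if is_test else 150
--     combinations_list = []
--     for comb_length in range(len(input_list)):
--         combinations_list.extend(list(combinations(input_list, comb_length)))
--     filtered_combinations = [len(combination) for combination in combinations_list if sum(combination) == eggnog_liters]
--     return len(
--         [1 for combination_length in filtered_combinations if combination_length == min(filtered_combinations)]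
--     )
-- ===== SOURCE B (Python) =====
-- def part_2(input_list: list, is_test: bool) -> int:
--     """Count the minimal-size combinations of containers that hold the eggnog.
--
--     Instead of materialising every combination, recursively COUNT the
--     k-element sub-lists summing to the target, for k = 0, 1, 2, ...;
--     the first k with a nonzero count is the minimum, and that count is
--     the answer.  The full-length subset is excluded (k < len(input_list)),
--     matching A's range(len(input_list)).
--     """
--     target = 25 if is_test else 150
--
--     def count_k(xs, k, s):
--         # number of k-element sub-lists of xs summing to s
--         if k == 0:
--             return 1 if s == 0 else 0
--         if not xs:
--             return 0
--         return count_k(xs[1:], k - 1, s - xs[0]) + count_k(xs[1:], k, s)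
--
--     for k in range(len(input_list)):
--         c = count_k(input_list, k, target)
--         if c:
--             return c
--     return 0
-- ===== Notes on version B (the rewrite author's own statement) =====
-- stated objective: alternative
-- what changed: B replaces materialising every combination plus a min/count pass over the length list by a recursive counter of k-element subsets summing to the target, tried for k = 0,1,2,... with early return at the first nonzero count.
import Mathlib
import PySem

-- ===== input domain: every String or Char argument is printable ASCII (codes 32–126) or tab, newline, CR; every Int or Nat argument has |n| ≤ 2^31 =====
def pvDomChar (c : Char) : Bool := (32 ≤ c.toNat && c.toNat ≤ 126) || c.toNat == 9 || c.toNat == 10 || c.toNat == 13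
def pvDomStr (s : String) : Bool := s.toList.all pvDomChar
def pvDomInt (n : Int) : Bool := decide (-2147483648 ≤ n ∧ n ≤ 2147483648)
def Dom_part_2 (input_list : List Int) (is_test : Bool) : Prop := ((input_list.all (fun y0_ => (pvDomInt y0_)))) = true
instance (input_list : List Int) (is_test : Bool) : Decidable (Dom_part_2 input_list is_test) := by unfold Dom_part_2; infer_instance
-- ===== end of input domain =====

-- B replaces materialising every combination and a min/count pass by a recursive
-- per-size counter with early return at the first size that has a nonzero count
-- (objective: alternative; not measured faster).

-- ===== PORT A =====
-- itertools.combinations(xs, k), in itertools' order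
def pvCombos : Nat → List Int → List (List Int)
  | 0, _ => [[]]
  | _ + 1, [] => []
  | k + 1, x :: r => (pvCombos k r).map (fun c => x :: c) ++ pvCombos (k + 1) r

def part_2 (input_list : List Int) (is_test : Bool) : Int :=
  let eggnog_liters : Int := if is_test then 25 else 150
  let combinations_list : List (List Int) :=
    (List.range input_list.length).foldl (fun acc k => acc ++ pvCombos k input_list) []
  let filtered : List Int :=
    (combinations_list.filter (fun c => c.sum == eggnog_liters)).map (fun c => (c.length : Int))
  -- min(filtered) on an empty list is never evaluated in Python (comprehension body
  -- never runs), so the empty case returns len([]) = 0, exactly as A does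
  match PySem.List.min? filtered (fun x => x) with
  | none => 0
  | some m => ((filtered.filter (fun l => l == m)).length : Int)

-- ===== PORT B =====
-- number of k-element sub-lists of xs summing to s (Source B's count_k)
def pvCountK : List Int → Int → Int → Int
  | [], k, s => if k = 0 then (if s = 0 then 1 else 0) else 0
  | x :: r, k, s =>
      if k = 0 then (if s = 0 then 1 else 0)
      else pvCountK r (k - 1) (s - x) + pvCountK r k s

-- Source B's for-loop with early return
def pvScanB (xs : List Int) (t : Int) : List Int → Int
  | [] => 0
  | k :: ks =>
      let c := pvCountK xs k t
      if c ≠ 0 then c else pvScanB xs t ks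

def part_2_alt (input_list : List Int) (is_test : Bool) : Int :=
  let target : Int := if is_test then 25 else 150
  pvScanB input_list target (PySem.List.pyRange 0 (input_list.length : Int) 1)

-- ===== PRECONDITION & SPEC =====
def Spec_part_2 (input_list : List Int) (is_test : Bool) (out : Int) : Prop := out = part_2_alt input_list is_test
instance (input_list : List Int) (is_test : Bool) (out : Int) : Decidable (Spec_part_2 input_list is_test out) := by unfold Spec_part_2; infer_instance

-- ===== CLAIM (what is proved, stated in full; the proofs are below) =====
def Claim_equal_part_2 : Prop := ∀ (input_list : List Int) (is_test : Bool), Dom_part_2 input_list is_test → Spec_part_2 input_list is_test (part_2 input_list is_test)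

-- ===== LEMMAS AND PROOFS =====

-- number of k-element combinations of xs summing to t
def pvCnt (xs : List Int) (t : Int) (k : Nat) : Nat :=
  ((pvCombos k xs).filter (fun c => c.sum == t)).length

lemma pvCountK_nil (k s : Int) :
    pvCountK [] k s = if k = 0 then (if s = 0 then 1 else 0) else 0 := rfl

lemma pvCountK_cons (x : Int) (r : List Int) (k s : Int) :
    pvCountK (x :: r) k s
      = if k = 0 then (if s = 0 then 1 else 0)
        else pvCountK r (k - 1) (s - x) + pvCountK r k s := rfl

lemma pvCountK_cast (xs : List Int) : ∀ (k : Nat) (s : Int),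
    pvCountK xs (k : Int) s = (pvCnt xs s k : Int) := by
  induction xs with
  | nil =>
      intro k s
      rw [pvCountK_nil]
      cases k with
      | zero =>
          by_cases hs : s = 0
          · simp [pvCnt, pvCombos, hs]
          · rw [if_pos (by norm_num), if_neg hs]
            simp [pvCnt, pvCombos,
              beq_eq_false_iff_ne.mpr (fun h => hs h.symm : ¬ (0:Int) = s)]
      | succ k =>
          rw [if_neg (by push_cast; omega)]
          simp [pvCnt, pvCombos]
  | cons x r ih =>
      intro k s
      rw [pvCountK_cons]
      cases k with
      | zero =>
          by_cases hs : s = 0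
          · simp [pvCnt, pvCombos, hs]
          · rw [if_pos (by norm_num), if_neg hs]
            simp [pvCnt, pvCombos,
              beq_eq_false_iff_ne.mpr (fun h => hs h.symm : ¬ (0:Int) = s)]
      | succ k =>
          rw [if_neg (by push_cast; omega)]
          have ih2 := ih (k + 1) s
          rw [show ((k+1:Nat):Int) - 1 = ((k:Nat):Int) by push_cast; ring,
            ih k (s - x), ih2]
          unfold pvCnt
          simp only [pvCombos, List.filter_append, List.length_append, List.filter_map]
          rw [show ((pvCombos k r).filter ((fun c => c.sum == s) ∘ fun c => x :: c))
                = (pvCombos k r).filter (fun c => c.sum == s - x) from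
              List.filter_congr (fun c _ => by
                simp only [Function.comp, List.sum_cons]
                rw [Bool.eq_iff_iff]; simp; omega)]
          simp only [List.length_map]
          push_cast
          ring

lemma mem_pvCombos_length : ∀ (xs : List Int) (k : Nat) (c : List Int),
    c ∈ pvCombos k xs → c.length = k := by
  intro xs
  induction xs with
  | nil =>
      intro k c hc
      cases k with
      | zero => simp [pvCombos] at hc; simp [hc]
      | succ k => simp [pvCombos] at hc
  | cons x r ih =>
      intro k c hc
      cases k with
      | zero => simp [pvCombos] at hc; simp [hc]
      | succ k =>
          simp only [pvCombos, List.mem_append, List.mem_map] at hc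
          rcases hc with ⟨d, hd, rfl⟩ | hc
          · simp [ih k d hd]
          · exact ih (k+1) c hc

lemma filter_map_pvCombos (xs : List Int) (t : Int) (k : Nat) :
    ((pvCombos k xs).filter (fun c => c.sum == t)).map (fun c => (c.length : Int))
      = List.replicate (pvCnt xs t k) (k : Int) := by
  rw [List.eq_replicate_iff]
  constructor
  · simp [pvCnt]
  · intro b hb
    simp only [List.mem_map, List.mem_filter] at hb
    rcases hb with ⟨c, ⟨hc, _⟩, rfl⟩
    rw [mem_pvCombos_length xs k c hc]

-- the filtered-lengths list of A, as a flatMap of replicates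
lemma filtered_eq (xs : List Int) (t : Int) :
    (((List.range xs.length).foldl (fun acc k => acc ++ pvCombos k xs) []).filter
        (fun c => c.sum == t)).map (fun c => (c.length : Int))
      = (List.range xs.length).flatMap (fun k => List.replicate (pvCnt xs t k) (k : Int)) := by
  rw [PySem.List.foldl_append_eq_flatMap]
  simp only [List.nil_append]
  induction List.range xs.length with
  | nil => simp
  | cons k ks ih =>
      simp only [List.flatMap_cons, List.filter_append, List.map_append, ih,
        filter_map_pvCombos]

def pvResultA (L : List Int) : Int :=
  match PySem.List.min? L (fun x => x) with
  | none => 0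
  | some m => ((L.filter (fun l => l == m)).length : Int)

lemma foldl_min_of_le : ∀ (t : List Int) (x : Int), (∀ y ∈ t, x ≤ y) → t.foldl min x = x := by
  intro t
  induction t with
  | nil => intro x _; rfl
  | cons y t ih =>
      intro x h
      simp only [List.foldl_cons]
      rw [min_eq_left (h y (by simp))]
      exact ih x (fun z hz => h z (by simp [hz]))

lemma core_resultA (c : Nat → Nat) : ∀ (ks : List Nat), ks.Pairwise (· < ·) →
    pvResultA (ks.flatMap (fun k => List.replicate (c k) (k : Int)))
      = match ks.find? (fun k => c k != 0) with
        | none => 0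
        | some k => (c k : Int) := by
  intro ks
  induction ks with
  | nil => intro _; simp [pvResultA, PySem.List.min?]
  | cons k ks ih =>
      intro hp
      have hlt : ∀ k' ∈ ks, k < k' := fun k' h => (List.pairwise_cons.mp hp).1 k' h
      have htail := (List.pairwise_cons.mp hp).2
      have hmem : ∀ y ∈ ks.flatMap (fun k' => List.replicate (c k') ((k' : Nat) : Int)),
          ∃ k' ∈ ks, y = ((k' : Nat) : Int) := by
        intro y hy
        simp only [List.mem_flatMap] at hy
        rcases hy with ⟨k', hk', hy⟩
        exact ⟨k', hk', List.eq_of_mem_replicate hy⟩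
      cases hck : c k with
      | zero =>
          simp only [List.flatMap_cons, hck, List.replicate_zero, List.nil_append,
            List.find?_cons, bne_self_eq_false]
          exact ih htail
      | succ m =>
          have hrep : List.replicate (c k) ((k : Nat) : Int)
              = (k : Int) :: List.replicate m ((k : Nat) : Int) := by
            rw [hck]; rfl
          simp only [List.flatMap_cons, hrep, List.cons_append]
          have hge : ∀ y ∈ List.replicate m ((k:Nat):Int) ++
              ks.flatMap (fun k' => List.replicate (c k') ((k':Nat):Int)), (k:Int) ≤ y := by
            intro y hy
            rcases List.mem_append.mp hy with h | h
            · rw [List.eq_of_mem_replicate h]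
            · rcases hmem y h with ⟨k', hk', rfl⟩
              exact_mod_cast (hlt k' hk').le
          unfold pvResultA
          rw [PySem.List.min?_id_cons, foldl_min_of_le _ _ hge]
          have hfr : (List.replicate m ((k:Nat):Int)).filter (fun l => l == (k:Int))
              = List.replicate m ((k:Nat):Int) := by
            apply List.filter_eq_self.mpr
            intro a ha
            simp [List.eq_of_mem_replicate ha]
          have hfrest : (ks.flatMap (fun k' => List.replicate (c k') ((k':Nat):Int))).filter
              (fun l => l == (k:Int)) = [] := by
            apply List.filter_eq_nil_iff.mpr
            intro a ha
            rcases hmem a ha with ⟨k', hk', rfl⟩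
            have := hlt k' hk'
            simp; omega
          simp only [List.filter_cons, beq_self_eq_true, if_pos, List.filter_append,
            hfr, hfrest, List.append_nil, List.length_cons, List.length_replicate]
          rw [List.find?_cons, show (c k != 0) = true by simp [hck]]
          simp [hck]

lemma pvScanB_eq (xs : List Int) (t : Int) : ∀ (ks : List Int),
    pvScanB xs t ks = match ks.find? (fun k => pvCountK xs k t != 0) with
      | none => 0
      | some k => pvCountK xs k t := by
  intro ks
  induction ks with
  | nil => rfl
  | cons k ks ih =>
      simp only [pvScanB, List.find?_cons]
      by_cases h : pvCountK xs k t = 0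
      · rw [if_neg (by simp [h]), show (pvCountK xs k t != 0) = false by simp [h]]
        exact ih
      · rw [if_pos h, show (pvCountK xs k t != 0) = true by simp [h]]

lemma part_2_eq (input_list : List Int) (is_test : Bool) :
    part_2 input_list is_test
      = pvResultA ((((List.range input_list.length).foldl
            (fun acc k => acc ++ pvCombos k input_list) []).filter
            (fun c => c.sum == (if is_test then 25 else 150))).map
            (fun c => (c.length : Int))) := rfl

lemma part_2_alt_eq (input_list : List Int) (is_test : Bool) :
    part_2_alt input_list is_test
      = pvScanB input_list (if is_test then 25 else 150)
          (PySem.List.pyRange 0 (input_list.length : Int) 1) := rfl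

-- ===== VERDICT (by name: the statement is the Claim_ definition above) =====
theorem part_2_spec : Claim_equal_part_2 := by
  intro input_list is_test _
  unfold Spec_part_2
  rw [part_2_eq, part_2_alt_eq]
  set t : Int := if is_test then 25 else 150 with ht
  set n := input_list.length with hn
  rw [filtered_eq input_list t]
  have hrange : PySem.List.pyRange 0 (n : Int) 1 = (List.range n).map (fun k : Nat => (k : Int)) := by
    rw [PySem.List.pyRange_one]
    simp
  rw [hrange, pvScanB_eq]
  rw [core_resultA (fun k => pvCnt input_list t k) (List.range n) List.pairwise_lt_range]
  have hfind : ((List.range n).map (fun k : Nat => (k : Int))).find?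
      (fun k => pvCountK input_list k t != 0)
      = ((List.range n).find? (fun k => pvCnt input_list t k != 0)).map (fun k : Nat => (k : Int)) := by
    rw [List.find?_map]
    have hp : ((fun k : Int => pvCountK input_list k t != 0) ∘ fun k : Nat => (k : Int))
        = (fun k : Nat => pvCnt input_list t k != 0) := by
      funext k
      simp only [Function.comp]
      rw [pvCountK_cast input_list k t]
      simp [bne, Int.natCast_eq_zero]
    rw [hp]
  rw [hfind]
  cases hf : (List.range n).find? (fun k => pvCnt input_list t k != 0) with
  | none => rfl
  | some k => simp [pvCountK_cast input_list k t]
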